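-- pv_equiv track=rewrite | github.com/lukeeterna/fluxion-desktop | voice-agent/src/orchestrator.py | _extract_vertical_key
-- ===== SOURCE A (Python) =====
-- def _extract_vertical_key(verticale_id: str) -> str:
--     """
--     Extract vertical key from verticale_id string.
--
--     Handles both new macro taxonomy (hair/beauty/wellness/medico/auto/professionale)
--     and legacy keys (salone/palestra/medical) for backward compatibility.
--
--     Examples:
--         "hair" -> "hair"
--         "hair_salone_bella" -> "hair"
--         "beauty_centro_rosa" -> "beauty"
--         "wellness_gym_fit" -> "wellness"
--         "medico_studio_rossi" -> "medico"
--         "professionale_studio_bianchi" -> "professionale"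
--         "salone_bella_vita" -> "salone"  (legacy)
--         "medical_studio_rossi" -> "medical"  (legacy)
--         "auto_officina_mario" -> "auto"
--     """
--     # New macro keys (setup.ts taxonomy) — check first for priority
--     NEW_VERTICALS = ["hair", "beauty", "wellness", "medico", "professionale"]
--     # Legacy keys (backward compat with existing businesses)
--     LEGACY_VERTICALS = ["salone", "palestra", "medical", "auto", "altro"]
--
--     verticale_lower = verticale_id.lower().strip()
--
--     # Exact match check (covers simple keys like "hair", "auto", etc.)
--     all_keys = NEW_VERTICALS + LEGACY_VERTICALS
--     if verticale_lower in all_keys: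
--         return verticale_lower
--
--     # Prefix match for composed IDs like "hair_salone_bella_vita"
--     for v in NEW_VERTICALS + LEGACY_VERTICALS:
--         if verticale_lower.startswith(v + "_") or verticale_lower.startswith(v + "-"):
--             return v
--
--     # Legacy: startswith without separator (old behavior)
--     for v in NEW_VERTICALS + LEGACY_VERTICALS:
--         if verticale_lower.startswith(v):
--             return v
--
--     return "altro"
-- ===== SOURCE B (Python) =====
-- _KEYS = ("hair", "beauty", "wellness", "medico", "professionale",
--          "salone", "palestra", "medical", "auto", "altro")
--
--
-- def _extract_vertical_key(verticale_id: str) -> str: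
--     s = verticale_id.lower().strip()
--     return next((k for k in _KEYS if s.startswith(k)), "altro")
-- ===== Notes on version B (the rewrite author's own statement) =====
-- stated objective: simpler
-- what changed: A's three sequential tiers (exact membership test, prefix-with-separator loop, bare-prefix loop) collapse into one single scan for the first key that prefixes the lowered/stripped id, valid because no key is a prefix of another (proved in Lean).
import Mathlib
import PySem

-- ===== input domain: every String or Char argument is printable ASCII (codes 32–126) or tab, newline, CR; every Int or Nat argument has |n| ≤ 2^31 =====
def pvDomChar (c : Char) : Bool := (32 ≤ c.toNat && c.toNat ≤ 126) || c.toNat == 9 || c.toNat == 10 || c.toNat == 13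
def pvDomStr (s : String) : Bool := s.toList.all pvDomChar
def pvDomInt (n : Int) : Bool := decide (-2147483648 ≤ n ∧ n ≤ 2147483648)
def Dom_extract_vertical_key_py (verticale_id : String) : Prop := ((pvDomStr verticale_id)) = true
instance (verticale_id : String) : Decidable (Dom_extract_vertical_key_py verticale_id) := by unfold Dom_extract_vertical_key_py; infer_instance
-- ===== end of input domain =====

-- B replaces A's three sequential tiers (exact membership, prefix+separator loop, bare-prefix
-- loop) with one scan for the first key prefixing the lowered/stripped id; valid because no key
-- is a prefix of another (proved below). Objective: simpler.

-- ===== PORT A =====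
def pvNewVerticals : List String := ["hair", "beauty", "wellness", "medico", "professionale"]
def pvLegacyVerticals : List String := ["salone", "palestra", "medical", "auto", "altro"]

def extract_vertical_key_py (verticale_id : String) : String :=
  let verticale_lower := PySem.Str.strip (PySem.Str.lower verticale_id)
  let all_keys := pvNewVerticals ++ pvLegacyVerticals
  if all_keys.contains verticale_lower then verticale_lower
  else
    match (pvNewVerticals ++ pvLegacyVerticals).find?
        (fun v => PySem.Str.startswith verticale_lower (v ++ "_")
               || PySem.Str.startswith verticale_lower (v ++ "-")) with
    | some v => v
    | none =>
      match (pvNewVerticals ++ pvLegacyVerticals).find?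
          (fun v => PySem.Str.startswith verticale_lower v) with
      | some v => v
      | none => "altro"

-- ===== PORT B =====
def pvKeysB : List String :=
  ["hair", "beauty", "wellness", "medico", "professionale",
   "salone", "palestra", "medical", "auto", "altro"]

def extract_vertical_key_py_alt (verticale_id : String) : String :=
  let s := PySem.Str.strip (PySem.Str.lower verticale_id)
  ((pvKeysB.find? (fun k => PySem.Str.startswith s k)).getD "altro")

-- ===== PRECONDITION & SPEC =====
def Spec_extract_vertical_key_py (verticale_id : String) (out : String) : Prop := out = extract_vertical_key_py_alt verticale_id
instance (verticale_id : String) (out : String) : Decidable (Spec_extract_vertical_key_py verticale_id out) := by unfold Spec_extract_vertical_key_py; infer_instance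

-- ===== CLAIM (what is proved, stated in full; the proofs are below) =====
def Claim_equal_extract_vertical_key_py : Prop := ∀ (verticale_id : String), Dom_extract_vertical_key_py verticale_id → Spec_extract_vertical_key_py verticale_id (extract_vertical_key_py verticale_id)

-- ===== LEMMAS AND PROOFS =====

-- No key of the list is a proper or improper prefix of a different key (checked by computation).
theorem pvKeys_prefix_free :
    ∀ a ∈ pvKeysB, ∀ b ∈ pvKeysB, a.toList <+: b.toList → a = b := by decide

-- Any two keys prefixing the same string are comparable, hence equal.
theorem pvKeys_unique (s : String) :
    ∀ a ∈ pvKeysB, ∀ b ∈ pvKeysB,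
      PySem.Str.startswith s a = true → PySem.Str.startswith s b = true → a = b := by
  intro a ha b hb hpa hpb
  rw [PySem.Str.startswith_eq, PySem.Chars.startswith_iff] at hpa hpb
  rcases List.prefix_or_prefix_of_prefix hpa hpb with h | h
  · exact pvKeys_prefix_free a ha b hb h
  · exact (pvKeys_prefix_free b hb a ha h).symm

-- a key with a trailing separator prefixing s means the key itself prefixes s
theorem pvSep_prefix (s v : String) (c : String)
    (h : PySem.Str.startswith s (v ++ c) = true) :
    PySem.Str.startswith s v = true := by
  rw [PySem.Str.startswith_eq, PySem.Chars.startswith_iff] at h ⊢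
  exact (List.prefix_append v.toList c.toList).trans (by simpa using h)

-- every string starts with itself
theorem pvStartswith_self (s : String) : PySem.Str.startswith s s = true := by
  rw [PySem.Str.startswith_eq, PySem.Chars.startswith_iff]

-- the core equality, for the already lowered/stripped string
theorem pvCore (s : String) :
    (if (pvNewVerticals ++ pvLegacyVerticals).contains s then s
     else
       match (pvNewVerticals ++ pvLegacyVerticals).find?
           (fun v => PySem.Str.startswith s (v ++ "_")
                  || PySem.Str.startswith s (v ++ "-")) with
       | some v => v
       | none =>
         match (pvNewVerticals ++ pvLegacyVerticals).find?
             (fun v => PySem.Str.startswith s v) with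
         | some v => v
         | none => "altro")
    = ((pvKeysB.find? (fun k => PySem.Str.startswith s k)).getD "altro") := by
  have hlist : pvNewVerticals ++ pvLegacyVerticals = pvKeysB := by rfl
  rw [hlist]
  rcases hF : pvKeysB.find? (fun k => PySem.Str.startswith s k) with _ | k
  · -- no key prefixes s: all three tiers of A fail
    have hnone : ∀ a ∈ pvKeysB, PySem.Str.startswith s a = false := by
      intro a ha
      simpa using List.find?_eq_none.mp hF a ha
    have hc : pvKeysB.contains s = false := by
      by_contra h
      have hs : s ∈ pvKeysB := by
        simpa using (Bool.not_eq_false _).mp h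
      have h1 := hnone s hs
      rw [pvStartswith_self s] at h1
      exact Bool.noConfusion h1
    have h2 : pvKeysB.find?
        (fun v => PySem.Str.startswith s (v ++ "_")
               || PySem.Str.startswith s (v ++ "-")) = none := by
      rw [List.find?_eq_none]
      intro v hv
      have hvf := hnone v hv
      simp only [Bool.or_eq_true, not_or]
      constructor
      · intro h
        have := pvSep_prefix s v "_" h
        rw [this] at hvf
        exact Bool.noConfusion hvf
      · intro h
        have := pvSep_prefix s v "-" h
        rw [this] at hvf
        exact Bool.noConfusion hvf
    rw [if_neg (by simpa using hc), h2]
    rfl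
  · -- k is the unique key prefixing s
    have hk : k ∈ pvKeysB := List.mem_of_find?_eq_some hF
    have hpk : PySem.Str.startswith s k = true := by
      simpa using List.find?_some hF
    simp only [Option.getD_some]
    by_cases hc : pvKeysB.contains s = true
    · -- s itself is a key; uniqueness forces s = k
      have hs : s ∈ pvKeysB := by simpa using hc
      rw [if_pos hc]
      exact pvKeys_unique s s hs k hk (pvStartswith_self s) hpk
    · rw [if_neg hc]
      rcases h2 : pvKeysB.find?
          (fun v => PySem.Str.startswith s (v ++ "_")
               || PySem.Str.startswith s (v ++ "-")) with _ | v
      · rfl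
      · have hv : v ∈ pvKeysB := List.mem_of_find?_eq_some h2
        have hpv : PySem.Str.startswith s v = true := by
          have := List.find?_some h2
          simp only [Bool.or_eq_true] at this
          rcases this with h | h
          · exact pvSep_prefix s v "_" h
          · exact pvSep_prefix s v "-" h
        exact pvKeys_unique s v hv k hk hpv hpk

-- ===== VERDICT (by name: the statement is the Claim_ definition above) =====
theorem extract_vertical_key_py_spec : Claim_equal_extract_vertical_key_py := by
  intro v _
  unfold Spec_extract_vertical_key_py extract_vertical_key_py extract_vertical_key_py_alt
  exact pvCore (PySem.Str.strip (PySem.Str.lower v))
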